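-- pv_equiv track=rewrite | github.com/samgakjisam/algorithm | 230816 _ stack2/recursive_max.py | f
-- ===== SOURCE A (Python) =====
-- def f(i,j): # A[i:j+1]에서 최댓값을 리턴하는 함수
--     if i == j:
--         return A[i]
--     else:
--         m = (i+j)//2 # 중간 인덱스
--         r1 = f(i, m) # 왼쪽 최댓값
--         r2 = f(m+1, j) # 오른쪽 최댓값
--         return max(r1,r2)
--
-- A = [2,1,9,7,4,3]
-- ===== SOURCE B (Python) =====
-- def f(i, j):  # max of A[i:j+1] by a flat left-to-right scan with a running maximum
--     m = A[i]
--     for k in range(i + 1, j + 1):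
--         if A[k] > m:
--             m = A[k]
--     return m
--
-- A = [2,1,9,7,4,3]
-- ===== Notes on version B (the rewrite author's own statement) =====
-- stated objective: simpler
-- what changed: Replaced the midpoint divide-and-conquer recursion with a single iterative scan that keeps a running maximum over A[i..j].
import Mathlib
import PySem

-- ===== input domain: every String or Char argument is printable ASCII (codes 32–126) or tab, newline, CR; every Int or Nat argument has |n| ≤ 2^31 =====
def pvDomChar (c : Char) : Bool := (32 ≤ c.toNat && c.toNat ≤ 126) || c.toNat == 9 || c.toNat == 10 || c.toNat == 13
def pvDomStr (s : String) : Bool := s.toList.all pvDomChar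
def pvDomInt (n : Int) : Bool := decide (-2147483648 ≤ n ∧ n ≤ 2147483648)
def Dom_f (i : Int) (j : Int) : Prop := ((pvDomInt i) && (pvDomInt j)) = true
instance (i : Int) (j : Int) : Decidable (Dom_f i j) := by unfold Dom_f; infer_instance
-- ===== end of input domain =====

-- B replaces A's midpoint divide-and-conquer recursion with one flat scan keeping a
-- running maximum; same values, simpler structure. Equality is proved on the inputs
-- where the Python A terminates without an exception (Pre_f below).

-- ===== PORT A =====
-- the module-level global A
def pyA : List Int := [2, 1, 9, 7, 4, 3]

-- A's recursion, transliterated with a fuel guard for totality: the fuel-exhausted and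
-- i > j branches return 0, which only happens where the Python recurses forever
-- (outside Pre_f); fuel 16 exceeds the recursion depth on every admitted input.
def fAux : Nat → Int → Int → Int
  | 0, _, _ => 0
  | fuel + 1, i, j =>
    if i = j then PySem.List.pyGetD pyA i 0
    else
      let m := PySem.Int.floordiv (i + j) 2   -- 중간 인덱스
      let r1 := fAux fuel i m                 -- 왼쪽 최댓값
      let r2 := fAux fuel (m + 1) j           -- 오른쪽 최댓값
      max r1 r2

def f (i : Int) (j : Int) : Int := fAux 16 i j

-- ===== PORT B =====
def f_alt (i : Int) (j : Int) : Int :=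
  (PySem.List.pyRange (i + 1) (j + 1) 1).foldl
    (fun m k => if PySem.List.pyGetD pyA k 0 > m then PySem.List.pyGetD pyA k 0 else m)
    (PySem.List.pyGetD pyA i 0)

-- ===== PRECONDITION & SPEC =====
-- Pre_f is exactly where the Python A returns: i ≤ j (otherwise the recursion never
-- terminates) and every index of i..j valid for the 6-element global A (IndexError otherwise).
def Pre_f (i : Int) (j : Int) : Prop := -6 ≤ i ∧ i ≤ j ∧ j ≤ 5
instance (i : Int) (j : Int) : Decidable (Pre_f i j) := by unfold Pre_f; infer_instance
def pvWitness_f : Int × Int := (0, 5)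

def Spec_f (i : Int) (j : Int) (out : Int) : Prop := out = f_alt i j
instance (i : Int) (j : Int) (out : Int) : Decidable (Spec_f i j out) := by unfold Spec_f; infer_instance

-- ===== CLAIM (what is proved, stated in full; the proofs are below) =====
def Claim_equal_f : Prop := ∀ (i : Int) (j : Int), Dom_f i j → Pre_f i j → Spec_f i j (f i j)

-- ===== LEMMAS AND PROOFS =====

-- ===== VERDICT (by name: the statement is the Claim_ definition above) =====
theorem f_spec : Claim_equal_f := by
  unfold Claim_equal_f Spec_f Pre_f
  intro i j _ hpre
  obtain ⟨h1, h2, h3⟩ := hpre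
  have hi5 : i ≤ 5 := le_trans h2 h3
  have hj6 : -6 ≤ j := le_trans h1 h2
  interval_cases i <;> interval_cases j <;> decide
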